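-- pv_equiv track=rewrite | github.com/gidesegid/microsoft_tigrina_word | my_input_text.py | youtubeTagsCleanUp
-- ===== SOURCE A (Python) =====
-- def youtubeTagsCleanUp(raw_tags):
--     try:
--         # Step 1: Split and clean each tag
--         tags = [tag.strip() for tag in raw_tags.split(',') if tag.strip()]
--
--         # Step 2: Remove duplicates while preserving order
--         seen = set()
--         unique_tags = []
--         for tag in tags:
--             if tag not in seen:
--                 seen.add(tag)
--                 unique_tags.append(tag)
--
--         # Step 3: Limit to 500 characters total including separators
--         final_tags = []
--         total_length = 0
--         for i, tag in enumerate(unique_tags):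
--             tag_length = len(tag)
--             separator_length = 2 if i > 0 else 0  # ", " between tags
--
--             if total_length + tag_length + separator_length <= 500:
--                 final_tags.append(tag)
--                 total_length += tag_length + separator_length
--             else:
--                 break
--
--         return final_tags
--     except Exception as error:
--         return f"Error: There was an error while cleaning up the YouTube tags. {error}"
-- ===== SOURCE B (Python) =====
-- def youtubeTagsCleanUp(raw_tags):
--     try:
--         # Ordered dedup of the cleaned tags via dict.fromkeys.
--         unique = list(dict.fromkeys(s for s in
--                       (t.strip() for t in raw_tags.split(',')) if s))
--
--         # Prefix sums of (len(tag) + 2).  Keeping the first k tags costs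
--         # sum(len) + 2*(k-1) chars, i.e. prefix[k-1] <= 502; since each
--         # increment is positive the prefix list is strictly increasing, so
--         # the greedy cut-off is found by binary search.
--         prefix = []
--         acc = 0
--         for tag in unique:
--             acc += len(tag) + 2
--             prefix.append(acc)
--
--         lo, hi = 0, len(prefix)
--         while lo < hi:
--             mid = (lo + hi) // 2
--             if prefix[mid] <= 502:
--                 lo = mid + 1
--             else:
--                 hi = mid
--         return unique[:lo]
--     except Exception as error:
--         return f"Error: There was an error while cleaning up the YouTube tags. {error}"
-- ===== Notes on version B (the rewrite author's own statement) =====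
-- stated objective: alternative
-- what changed: Dedup is done by ordered dict.fromkeys instead of A's explicit seen-set loop, and A's stateful enumerate/break budget loop is replaced by building the prefix sums of len(tag)+2 and binary-searching (the sums are strictly increasing) for the largest prefix with sum <= 502, then slicing.
import Mathlib
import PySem

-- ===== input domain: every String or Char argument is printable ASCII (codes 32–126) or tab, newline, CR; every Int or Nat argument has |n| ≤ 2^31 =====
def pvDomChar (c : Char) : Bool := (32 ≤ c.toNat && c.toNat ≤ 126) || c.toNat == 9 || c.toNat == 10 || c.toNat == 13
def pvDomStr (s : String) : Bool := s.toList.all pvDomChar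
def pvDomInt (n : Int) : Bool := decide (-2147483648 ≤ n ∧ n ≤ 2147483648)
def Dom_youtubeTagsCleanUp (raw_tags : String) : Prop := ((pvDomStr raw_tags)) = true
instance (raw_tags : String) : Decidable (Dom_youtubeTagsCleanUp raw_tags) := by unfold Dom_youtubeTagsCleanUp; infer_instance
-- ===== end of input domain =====

-- B replaces A's dedup loop by an ordered dict.fromkeys dedup and A's budget loop by prefix sums + binary search; objective: alternative.


-- ===== PORT A =====
-- raw_tags.split(',') — separator non-empty, so Python's split is Chars.splitOn (exact)
def ytSplit (s : String) : List String :=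
  (PySem.Chars.splitOn s.toList ",".toList).map String.ofList

-- Step 2 loop of A: dedup keeping first occurrences, using a seen set
def ytDedup (seen : PySem.Set String) : List String → List String
  | [] => []
  | t :: ts =>
    if PySem.Set.contains seen t then ytDedup seen ts
    else t :: ytDedup (PySem.Set.add seen t) ts

-- Step 3 loop of A: budget loop over enumerate(unique_tags), break on overflow
def ytBudget (i : Nat) (total : Int) : List String → List String
  | [] => []
  | t :: ts =>
    let tag_length := PySem.Str.len t
    let separator_length : Int := if 0 < i then 2 else 0
    if total + tag_length + separator_length ≤ 500 then
      t :: ytBudget (i + 1) (total + tag_length + separator_length) ts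
    else []

def youtubeTagsCleanUp (raw_tags : String) : List String :=
  let tags := ((ytSplit raw_tags).map PySem.Str.strip).filter (fun t => t ≠ "")
  ytBudget 0 0 (ytDedup PySem.Set.empty tags)

-- ===== PORT B =====
-- B's prefix-sum loop: prefix.append(acc) after acc += len(tag) + 2
def ytPrefix (acc : Int) : List String → List Int
  | [] => []
  | t :: ts => (acc + PySem.Str.len t + 2) :: ytPrefix (acc + PySem.Str.len t + 2) ts

-- B's hand-written binary search (while lo < hi); p.getD mid 0 is exact for
-- Python's p[mid] because the loop keeps mid < hi ≤ len(p)
def ytBSearch (p : List Int) (lo hi : Nat) : Nat :=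
  if _h : lo < hi then
    let mid := (lo + hi) / 2
    if p.getD mid 0 ≤ 502 then ytBSearch p (mid + 1) hi
    else ytBSearch p lo mid
  else lo
termination_by hi - lo
decreasing_by all_goals omega

def youtubeTagsCleanUp_alt (raw_tags : String) : List String :=
  let unique := PySem.List.dedup
    (((PySem.Chars.splitOn raw_tags.toList ",".toList).map
        (fun t => PySem.Str.strip (String.ofList t))).filter (fun s => s ≠ ""))
  let pfx := ytPrefix 0 unique
  unique.take (ytBSearch pfx 0 pfx.length)

-- ===== PRECONDITION & SPEC =====
def Spec_youtubeTagsCleanUp (raw_tags : String) (out : List String) : Prop := out = youtubeTagsCleanUp_alt raw_tags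
instance (raw_tags : String) (out : List String) : Decidable (Spec_youtubeTagsCleanUp raw_tags out) := by unfold Spec_youtubeTagsCleanUp; infer_instance

-- ===== CLAIM (what is proved, stated in full; the proofs are below) =====
def Claim_equal_youtubeTagsCleanUp : Prop := ∀ (raw_tags : String), Dom_youtubeTagsCleanUp raw_tags → Spec_youtubeTagsCleanUp raw_tags (youtubeTagsCleanUp raw_tags)

-- ===== LEMMAS AND PROOFS =====

-- A's seen-set loop builds exactly the ordered dedup (dict.fromkeys) B uses
lemma ytDedup_eq_foldl (L : List String) : ∀ (seen : PySem.Set String),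
    L.foldl PySem.Set.add seen = seen ++ ytDedup seen L := by
  induction L with
  | nil => intro seen; simp [ytDedup]
  | cons t ts ih =>
    intro seen
    by_cases hc : PySem.Set.contains seen t
    · have hm : t ∈ seen := by simpa using hc
      have : PySem.Set.add seen t = seen := by simp only [PySem.Set.add, hc, if_true]
      rw [List.foldl_cons, this, ih]
      simp [ytDedup, hm]
    · have hm : t ∉ seen := by simpa using hc
      rw [List.foldl_cons, ih]
      simp [ytDedup, hm, PySem.Set.add]

-- tag lengths are nonnegative …
lemma ytLen_nonneg (s : String) : (0:Int) ≤ PySem.Str.len s := by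
  simp [PySem.Str.len_eq]

-- … so the prefix sums are monotone
lemma ytPrefix_le_mem (U : List String) : ∀ (acc y : Int), y ∈ ytPrefix acc U → acc ≤ y := by
  induction U with
  | nil => intro acc y h; simp [ytPrefix] at h
  | cons t ts ih =>
    intro acc y h
    have hl := ytLen_nonneg t
    rcases (by simpa [ytPrefix] using h :
        y = acc + PySem.Str.len t + 2 ∨ y ∈ ytPrefix (acc + PySem.Str.len t + 2) ts) with h1 | h2
    · omega
    · have := ih (acc + PySem.Str.len t + 2) y h2; omega

lemma ytPrefix_pairwise (U : List String) : ∀ acc, List.Pairwise (· ≤ ·) (ytPrefix acc U) := by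
  induction U with
  | nil => intro acc; simp [ytPrefix]
  | cons t ts ih =>
    intro acc
    refine List.pairwise_cons.mpr ⟨fun y hy => ?_, ih _⟩
    exact ytPrefix_le_mem ts _ y hy

-- binary-search correctness on a list whose "≤ 502" region is downward closed
lemma ytBSearch_spec (p : List Int)
    (M : ∀ i j, i ≤ j → j < p.length → p.getD j 0 ≤ 502 → p.getD i 0 ≤ 502) :
    ∀ n lo hi, hi - lo = n → lo ≤ hi → hi ≤ p.length →
      (∀ i, i < lo → p.getD i 0 ≤ 502) →
      (∀ i, hi ≤ i → i < p.length → ¬ p.getD i 0 ≤ 502) →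
      (∀ i, i < ytBSearch p lo hi → p.getD i 0 ≤ 502) ∧
      (ytBSearch p lo hi < p.length → ¬ p.getD (ytBSearch p lo hi) 0 ≤ 502) ∧
      ytBSearch p lo hi ≤ p.length := by
  intro n
  induction n using Nat.strong_induction_on with
  | _ n ih =>
    intro lo hi hn hlh hhp H1 H2
    rw [ytBSearch]
    by_cases hlt : lo < hi
    · simp only [hlt, dif_pos]
      by_cases hm : p.getD ((lo + hi) / 2) 0 ≤ 502
      · simp only [hm, if_true]
        refine ih (hi - ((lo + hi) / 2 + 1)) (by omega) ((lo + hi) / 2 + 1) hi rfl (by omega) hhp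
          (fun i hi2 => ?_) H2
        exact M i ((lo + hi) / 2) (by omega) (by omega) hm
      · simp only [hm, if_false]
        refine ih (((lo + hi) / 2) - lo) (by omega) lo ((lo + hi) / 2) rfl (by omega) (by omega) H1
          (fun i hi1 hi2 => fun hP => hm (M ((lo + hi) / 2) i (by omega) hi2 hP))
    · simp only [dif_neg hlt]
      have : lo = hi := by omega
      exact ⟨H1, fun hlen => H2 lo (by omega) hlen, by omega⟩

-- a number with the cut-off characterization IS the takeWhile length
lemma ytCharUnique (q : Int → Bool) (p : List Int) : ∀ (r : Nat),
    (∀ i, i < r → q (p.getD i 0) = true) → (r < p.length → ¬ q (p.getD r 0) = true) →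
    r ≤ p.length → r = (p.takeWhile q).length := by
  induction p with
  | nil => intro r _ _ h3; simpa using h3
  | cons x xs ih =>
    intro r h1 h2 h3
    by_cases hq : q x = true
    · cases r with
      | zero => exact absurd hq (h2 (by simp))
      | succ r' =>
        rw [List.takeWhile_cons, if_pos hq, List.length_cons]
        have := ih r' (fun i hi => h1 (i + 1) (by omega)) (fun hlt => h2 (by simpa using hlt))
          (by simpa using h3)
        omega
    · cases r with
      | zero => simp [hq]
      | succ r' => exact absurd (h1 0 (by omega)) hq

-- A's budget loop is "take while the prefix sum fits in 502"
lemma ytBudget_succ (U : List String) : ∀ (total : Int) (k : Nat),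
    ytBudget (k + 1) total U =
      U.take ((ytPrefix (total + 2) U).takeWhile (fun x => decide (x ≤ 502))).length := by
  induction U with
  | nil => intro total k; simp [ytBudget, ytPrefix]
  | cons t ts ih =>
    intro total k
    simp only [PySem.Str.len_eq] at ih ⊢
    by_cases hb : total + (t.toList.length : Int) + 2 ≤ 500
    · have hb' : total + 2 + (t.toList.length : Int) + 2 ≤ 502 := by omega
      have harg : total + 2 + (t.toList.length : Int) + 2
          = total + (t.toList.length : Int) + 2 + 2 := by ring
      rw [harg] at hb'
      simp only [ytBudget, ytPrefix, PySem.Str.len_eq, List.takeWhile_cons, hb, hb',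
        Nat.zero_lt_succ, decide_true, if_true, List.length_cons, List.take_succ_cons, harg,
        ih (total + (t.toList.length : Int) + 2) (k + 1)]
    · have hb' : ¬ (total + 2 + (t.toList.length : Int) + 2 ≤ 502) := by omega
      have hd : decide (total + 2 + (t.toList.length : Int) + 2 ≤ 502) = false :=
        decide_eq_false hb'
      simp only [ytBudget, ytPrefix, PySem.Str.len_eq, List.takeWhile_cons, hd,
        Nat.zero_lt_succ, if_true, Bool.false_eq_true, if_false, List.length_nil, List.take_zero]
      rw [if_neg hb]

lemma ytBudget_zero (U : List String) :
    ytBudget 0 0 U = U.take ((ytPrefix 0 U).takeWhile (fun x => decide (x ≤ 502))).length := by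
  cases U with
  | nil => simp [ytBudget, ytPrefix]
  | cons t ts =>
    have key := ytBudget_succ ts
    simp only [PySem.Str.len_eq] at key
    by_cases hb : (0:Int) + (t.toList.length : Int) + 0 ≤ 500
    · have hb' : (0:Int) + (t.toList.length : Int) + 2 ≤ 502 := by omega
      have harg : (0:Int) + (t.toList.length : Int) + 2
          = 0 + (t.toList.length : Int) + 0 + 2 := by ring
      rw [harg] at hb'
      simp only [ytBudget, ytPrefix, PySem.Str.len_eq, List.takeWhile_cons, Nat.lt_irrefl,
        if_false, hb, hb', decide_true, if_true, List.length_cons, List.take_succ_cons, harg,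
        key (0 + (t.toList.length : Int) + 0) 0]
    · have hd : decide ((0:Int) + (t.toList.length : Int) + 2 ≤ 502) = false :=
        decide_eq_false (by omega)
      simp only [ytBudget, ytPrefix, PySem.Str.len_eq, List.takeWhile_cons, hd, Nat.lt_irrefl,
        if_false, Bool.false_eq_true, List.length_nil, List.take_zero]
      rw [if_neg hb]

-- the binary search over the whole prefix list returns exactly that takeWhile length
lemma ytBSearch_eq_takeWhile (U : List String) :
    ytBSearch (ytPrefix 0 U) 0 (ytPrefix 0 U).length =
      ((ytPrefix 0 U).takeWhile (fun x => decide (x ≤ 502))).length := by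
  have hpw := ytPrefix_pairwise U 0
  have M : ∀ i j, i ≤ j → j < (ytPrefix 0 U).length →
      (ytPrefix 0 U).getD j 0 ≤ 502 → (ytPrefix 0 U).getD i 0 ≤ 502 := by
    intro i j hij hj hPj
    rcases Nat.lt_or_ge i j with h | h
    · have hi : i < (ytPrefix 0 U).length := by omega
      rw [List.getD_eq_getElem _ 0 hj] at hPj
      rw [List.getD_eq_getElem _ 0 hi]
      have hle := (List.pairwise_iff_getElem.mp hpw) i j hi hj h
      omega
    · have : i = j := by omega
      subst this; exact hPj
  obtain ⟨h1, h2, h3⟩ := ytBSearch_spec (ytPrefix 0 U) M (ytPrefix 0 U).length 0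
    (ytPrefix 0 U).length (by omega) (by omega) le_rfl (by omega)
    (fun i hge hlt => absurd hge (by omega))
  exact ytCharUnique _ _ _ (fun i hi => decide_eq_true (h1 i hi))
    (fun hl hd => h2 hl (of_decide_eq_true hd)) h3

-- ===== VERDICT (by name: the statement is the Claim_ definition above) =====
theorem youtubeTagsCleanUp_spec : Claim_equal_youtubeTagsCleanUp := by
  intro raw_tags _
  unfold Spec_youtubeTagsCleanUp youtubeTagsCleanUp youtubeTagsCleanUp_alt
  have hlists :
      ((ytSplit raw_tags).map PySem.Str.strip).filter (fun t => t ≠ "") =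
      ((PySem.Chars.splitOn raw_tags.toList ",".toList).map
        (fun t => PySem.Str.strip (String.ofList t))).filter (fun s => s ≠ "") := by
    simp [ytSplit, List.map_map, Function.comp_def]
  rw [← hlists]
  have hded : ytDedup PySem.Set.empty
      (((ytSplit raw_tags).map PySem.Str.strip).filter (fun t => t ≠ "")) =
      PySem.List.dedup (((ytSplit raw_tags).map PySem.Str.strip).filter (fun t => t ≠ "")) := by
    have := ytDedup_eq_foldl
      (((ytSplit raw_tags).map PySem.Str.strip).filter (fun t => t ≠ "")) PySem.Set.empty
    simp [PySem.Set.empty] at this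
    simp [PySem.List.dedup_eq_ofList, PySem.Set.ofList_eq_foldl, PySem.Set.empty, this]
  rw [← hded, ytBudget_zero]
  exact congrArg (fun n => List.take n
    (ytDedup PySem.Set.empty (((ytSplit raw_tags).map PySem.Str.strip).filter (fun t => t ≠ ""))))
    (ytBSearch_eq_takeWhile _).symm
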